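-- pv_equiv track=rewrite | github.com/huiman2/huiman2 | python project.py | rotate_diagonalSE_part2
-- ===== SOURCE A (Python) =====
-- def rotate_diagonalSE_part2(word_board):
--     '''(list) -> (list)
--     Rotates the second half of the board in the SE direction
--
--     >>> rotate_diagonalSE_part2(word_board2)
--     [['q', 'o', 's'], ['m', 'x'], ['p']]
--     '''
--     # finds the number of columns
--     number_columns = len(word_board[0])
--     # creates an empty list for the final output list of list
--     rotated_board = []
--     new_row = []
--     # goes through each column and selects specific letters for the list
--     for i in range (number_columns-1):
--         for j in range (number_columns-1-i, 0, -1):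
--             new_row.append(word_board[number_columns-j][number_columns-j-1-i])
--         # creates new list of list with diagonal letters going SE
--         rotated_board.append(new_row)
--         new_row = []
--     return rotated_board
-- ===== SOURCE B (Python) =====
-- def rotate_diagonalSE_part2(word_board):
--     # Scatter version: one row-major pass dropping each cell into its diagonal bucket.
--     n = len(word_board[0])
--     rotated_board = [[] for _ in range(n - 1)]
--     for k in range(1, n):
--         row = word_board[k]
--         for i in range(k):
--             rotated_board[i].append(row[k - 1 - i])
--     return rotated_board
-- ===== Notes on version B (the rewrite author's own statement) =====
-- stated objective: alternative
-- what changed: B preallocates the N-1 diagonal buckets and scatters the board row by row (each cell wb[k][k-1-i] appended to bucket i), instead of A's per-diagonal gather that walks a countdown index j and recomputes row/column indices N-j, N-j-1-i for each diagonal.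
import Mathlib
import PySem

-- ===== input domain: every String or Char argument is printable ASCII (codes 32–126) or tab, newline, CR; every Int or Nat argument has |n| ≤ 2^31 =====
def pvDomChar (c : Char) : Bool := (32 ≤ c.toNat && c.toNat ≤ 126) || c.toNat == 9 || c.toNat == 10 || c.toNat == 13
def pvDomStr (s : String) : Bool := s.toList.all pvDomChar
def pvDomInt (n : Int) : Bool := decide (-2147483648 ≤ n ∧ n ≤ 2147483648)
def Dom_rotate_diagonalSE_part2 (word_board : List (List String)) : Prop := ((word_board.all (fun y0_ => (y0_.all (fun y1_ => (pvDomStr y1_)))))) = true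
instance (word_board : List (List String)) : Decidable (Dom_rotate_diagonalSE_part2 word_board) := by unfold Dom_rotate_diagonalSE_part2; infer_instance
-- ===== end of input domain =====

-- B scatters the board row by row into preallocated diagonal buckets instead of A's per-diagonal countdown gather; same cost, different traversal (objective: alternative).


-- ===== PORT A =====
def rotate_diagonalSE_part2 (word_board : List (List String)) : List (List String) :=
  let number_columns : Int := ((PySem.List.pyGetD word_board 0 []).length : Int)
  (PySem.List.pyRange 0 (number_columns - 1) 1).foldl
    (fun rotated_board i =>
      let new_row := (PySem.List.pyRange (number_columns - 1 - i) 0 (-1)).foldl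
        (fun new_row j =>
          new_row ++ [PySem.List.pyGetD (PySem.List.pyGetD word_board (number_columns - j) [])
            (number_columns - j - 1 - i) ""])
        []
      rotated_board ++ [new_row])
    []

-- ===== PORT B =====
def rotate_diagonalSE_part2_alt (word_board : List (List String)) : List (List String) :=
  let n : Int := ((PySem.List.pyGetD word_board 0 []).length : Int)
  let init : List (List String) := (PySem.List.pyRange 0 (n - 1) 1).map (fun _ => [])
  (PySem.List.pyRange 1 n 1).foldl
    (fun rb k =>
      let row := PySem.List.pyGetD word_board k []
      (PySem.List.pyRange 0 k 1).foldl
        (fun rb i => rb.set i.toNat ((rb.getD i.toNat []) ++ [PySem.List.pyGetD row (k - 1 - i) ""]))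
        rb)
    init

-- ===== PRECONDITION & SPEC =====
-- Pre_ excludes exactly the inputs where Python A raises an IndexError: the empty board
-- (len(word_board[0])) and boards where some accessed cell word_board[k][k-1-i]
-- (1 ≤ k < N, 0 ≤ i < k) is out of range; B raises on exactly the same inputs.
def Pre_rotate_diagonalSE_part2 (word_board : List (List String)) : Prop :=
  word_board ≠ [] ∧
  ∀ k < (word_board.headD []).length, 0 < k →
    k < word_board.length ∧ k ≤ (word_board.getD k []).length
instance (word_board : List (List String)) : Decidable (Pre_rotate_diagonalSE_part2 word_board) := by
  unfold Pre_rotate_diagonalSE_part2; infer_instance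

def pvWitness_rotate_diagonalSE_part2 : List (List String) := [["a", "b"], ["c", "d"]]

def Spec_rotate_diagonalSE_part2 (word_board : List (List String)) (out : List (List String)) : Prop := out = rotate_diagonalSE_part2_alt word_board
instance (word_board : List (List String)) (out : List (List String)) : Decidable (Spec_rotate_diagonalSE_part2 word_board out) := by unfold Spec_rotate_diagonalSE_part2; infer_instance

-- ===== CLAIM (what is proved, stated in full; the proofs are below) =====
def Claim_equal_rotate_diagonalSE_part2 : Prop := ∀ (word_board : List (List String)), Dom_rotate_diagonalSE_part2 word_board → Pre_rotate_diagonalSE_part2 word_board → Spec_rotate_diagonalSE_part2 word_board (rotate_diagonalSE_part2 word_board)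

-- ===== LEMMAS AND PROOFS =====

-- A's result in closed form: diagonal i is [wb[i+1+t][t] for t < N-1-i].
theorem rotate_diagonalSE_part2_A_closed (wb : List (List String)) :
    rotate_diagonalSE_part2 wb =
      (List.range ((PySem.List.pyGetD wb 0 []).length - 1)).map (fun (i : Nat) =>
        (List.range ((PySem.List.pyGetD wb 0 []).length - 1 - i)).map (fun (t : Nat) =>
          PySem.List.pyGetD (PySem.List.pyGetD wb ((i : Int) + 1 + (t : Int)) [])
            ((t : Int)) "")) := by
  simp only [rotate_diagonalSE_part2, PySem.List.foldl_append_singleton_eq_map, List.nil_append,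
    PySem.List.pyRange_one, PySem.List.pyRange_neg_one, List.map_map, Function.comp_def,
    zero_add, sub_zero]
  have e1 : ((((PySem.List.pyGetD wb 0 []).length : Int)) - 1).toNat
      = (PySem.List.pyGetD wb 0 []).length - 1 := by omega
  rw [e1]
  refine List.map_congr_left fun k _ => ?_
  have e2 : ((((PySem.List.pyGetD wb 0 []).length : Int)) - 1 - (k : Int)).toNat
      = (PySem.List.pyGetD wb 0 []).length - 1 - k := by omega
  rw [e2]
  refine List.map_congr_left fun t _ => ?_
  have h3 : (((PySem.List.pyGetD wb 0 []).length : Int))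
        - ((((PySem.List.pyGetD wb 0 []).length : Int)) - 1 - (k : Int) - (t : Int))
      = (k : Int) + 1 + (t : Int) := by ring
  rw [h3]
  have h4 : (k : Int) + 1 + (t : Int) - 1 - (k : Int) = (t : Int) := by ring
  rw [h4]

-- one .set of an element of a mapped range, as a map
theorem set_map_range {α : Type} (h : Nat → α) (m k : Nat) (hk : k < m) (v : α) :
    ((List.range m).map h).set k v = (List.range m).map (fun i => if i = k then v else h i) := by
  apply List.ext_getElem (by simp)
  intro i h1 h2
  simp only [List.getElem_set, List.getElem_map, List.getElem_range]
  rcases eq_or_ne k i with rfl | hik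
  · simp
  · rw [if_neg hik, if_neg hik.symm]

-- B's inner loop: appending g i to bucket i for all i < k, on a mapped-range state.
theorem inner_on_map (g : Int → String) (h : Nat → List String) (m k : Nat) (hk : k ≤ m) :
    (PySem.List.pyRange 0 (k : Int) 1).foldl
      (fun rb i => rb.set i.toNat ((rb.getD i.toNat []) ++ [g i]))
      ((List.range m).map h)
    = (List.range m).map (fun i => if i < k then h i ++ [g i] else h i) := by
  induction k with
  | zero =>
      rw [PySem.List.pyRange_one_eq_nil (by norm_num)]
      simp
  | succ k ih =>
      have hk' : k ≤ m := Nat.le_of_succ_le hk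
      have hcast : ((k + 1 : Nat) : Int) = (k : Int) + 1 := by push_cast; ring
      rw [hcast, PySem.List.pyRange_one_succ_right (by positivity), List.foldl_append, ih hk']
      simp only [List.foldl_cons, List.foldl_nil, Int.toNat_natCast]
      rw [PySem.List.getD_map_range _ _ _ _ (by omega)]
      rw [set_map_range _ _ _ (by omega)]
      apply List.map_congr_left
      intro a _
      by_cases h1 : a = k
      · subst h1; simp
      · by_cases h2 : a < k <;> simp [h1, h2] <;> omega

-- B's outer loop invariant: after rows 1..K-1 are scattered, bucket i holds
-- [wb[i+1+t][t] for t < K-1-i].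
theorem B_outer (wb : List (List String)) (m K : Nat) (hK : K ≤ m + 1) :
    (PySem.List.pyRange 1 (K : Int) 1).foldl
      (fun rb k =>
        (PySem.List.pyRange 0 k 1).foldl
          (fun rb i => rb.set i.toNat ((rb.getD i.toNat [])
            ++ [PySem.List.pyGetD (PySem.List.pyGetD wb k []) (k - 1 - i) ""]))
          rb)
      ((List.range m).map (fun _ => ([] : List String)))
    = (List.range m).map (fun (i : Nat) =>
        (List.range (K - 1 - i)).map (fun (t : Nat) =>
          PySem.List.pyGetD (PySem.List.pyGetD wb ((i : Int) + 1 + (t : Int)) []) ((t : Int)) "")) := by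
  induction K with
  | zero =>
      rw [PySem.List.pyRange_one_eq_nil (by norm_num)]
      simp
  | succ K ih =>
      by_cases hK0 : K = 0
      · subst hK0
        rw [PySem.List.pyRange_one_eq_nil (by norm_num)]
        simp
      · have h1K : 1 ≤ K := Nat.one_le_iff_ne_zero.mpr hK0
        have hcast : ((K + 1 : Nat) : Int) = (K : Int) + 1 := by push_cast; ring
        rw [hcast, PySem.List.pyRange_one_succ_right (by exact_mod_cast h1K),
          List.foldl_append, ih (by omega)]
        simp only [List.foldl_cons, List.foldl_nil]
        rw [inner_on_map
          (fun i => PySem.List.pyGetD (PySem.List.pyGetD wb (K : Int) []) ((K : Int) - 1 - i) "")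
          (fun (i : Nat) => (List.range (K - 1 - i)).map (fun (t : Nat) =>
            PySem.List.pyGetD (PySem.List.pyGetD wb ((i : Int) + 1 + (t : Int)) []) ((t : Int)) ""))
          m K (by omega)]
        refine List.map_congr_left fun i _ => ?_
        by_cases hiK : i < K
        · rw [if_pos hiK]
          have hsplit : K + 1 - 1 - i = (K - 1 - i) + 1 := by omega
          rw [hsplit, List.range_succ, List.map_append, List.map_cons, List.map_nil]
          congr 1
          have c1 : ((i : Int) + 1 + ((K - 1 - i : Nat) : Int)) = (K : Int) := by omega
          have c2 : ((K : Int) - 1 - (i : Int)) = ((K - 1 - i : Nat) : Int) := by omega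
          rw [c1, c2]
        · rw [if_neg hiK]
          have : K + 1 - 1 - i = K - 1 - i := by omega
          rw [this]

-- B's result in the same closed form.
theorem rotate_diagonalSE_part2_B_closed (wb : List (List String)) :
    rotate_diagonalSE_part2_alt wb =
      (List.range ((PySem.List.pyGetD wb 0 []).length - 1)).map (fun (i : Nat) =>
        (List.range ((PySem.List.pyGetD wb 0 []).length - 1 - i)).map (fun (t : Nat) =>
          PySem.List.pyGetD (PySem.List.pyGetD wb ((i : Int) + 1 + (t : Int)) [])
            ((t : Int)) "")) := by
  simp only [rotate_diagonalSE_part2_alt]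
  rw [PySem.List.pyRange_one 0 ((((PySem.List.pyGetD wb 0 []).length : Int)) - 1)]
  simp only [List.map_map, Function.comp_def, sub_zero]
  have e1 : ((((PySem.List.pyGetD wb 0 []).length : Int)) - 1).toNat
      = (PySem.List.pyGetD wb 0 []).length - 1 := by omega
  rw [e1]
  exact B_outer wb ((PySem.List.pyGetD wb 0 []).length - 1)
    ((PySem.List.pyGetD wb 0 []).length) (by omega)

-- ===== VERDICT (by name: the statement is the Claim_ definition above) =====
theorem rotate_diagonalSE_part2_spec : Claim_equal_rotate_diagonalSE_part2 := by
  intro wb _ _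
  unfold Spec_rotate_diagonalSE_part2
  rw [rotate_diagonalSE_part2_A_closed, rotate_diagonalSE_part2_B_closed]
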